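-- pv_equiv track=rewrite | github.com/Michal0ss/WDI | WDI_algo/kolosy/22/B4_Again.py | atakowane_pola
-- ===== SOURCE A (Python) =====
-- def atakowane_pola(t):
--     n=len(t)
--     szachowane=[[False for _ in range(n)]for _ in range(n)]
--
--     for i in range(n):
--         for j in range(n):
--             if t[i][j]:
--                 for k in range(n):
--                     szachowane[i][k] = True
--                     szachowane[k][i] = True
--
--     for i in range(n):
--         for j in range(n):
--             if not szachowane[i][j]:
--                 return False
--     return True
-- ===== SOURCE B (Python) =====
-- def atakowane_pola(t):
--     n = len(t)
--     rows_all = all(any(r[:n]) for r in t)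
--     cols_all = all(any(r[j] for r in t) for j in range(n))
--     return rows_all or cols_all
-- ===== Notes on version B (the rewrite author's own statement) =====
-- stated objective: faster
-- what changed: replaces the O(n^3) attacked-matrix simulation by direct row/column occupancy: the board is covered iff every row has a rook or every column has a rook
-- intended difference: On boards where every column holds a rook but some row holds none, A returns False (its inner loop marks column i instead of column j, so A effectively only tests that every row has a rook); B returns True, the intended coverage answer. — e.g. on atakowane_pola([[true, true], [false, false]]): A returns false, B returns true
import Mathlib
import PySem

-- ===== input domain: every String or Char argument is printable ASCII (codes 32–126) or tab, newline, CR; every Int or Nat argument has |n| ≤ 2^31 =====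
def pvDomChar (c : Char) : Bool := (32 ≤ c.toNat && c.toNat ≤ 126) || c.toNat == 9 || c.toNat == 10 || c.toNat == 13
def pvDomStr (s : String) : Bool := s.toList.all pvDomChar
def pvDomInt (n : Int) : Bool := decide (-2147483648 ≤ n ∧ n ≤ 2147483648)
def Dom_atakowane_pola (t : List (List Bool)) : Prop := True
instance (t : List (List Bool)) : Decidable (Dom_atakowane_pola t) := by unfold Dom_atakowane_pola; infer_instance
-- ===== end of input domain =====

-- B replaces A's O(n^3) attacked-matrix simulation by direct row/column occupancy checks (faster, asymptotic).

-- ===== PORT A =====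
-- szachowane[i][k] = True  (all indices here come from range(n), hence are nonnegative and in range)
def pvSet (m : List (List Bool)) (i k : Int) : List (List Bool) :=
  m.set i.toNat ((m.getD i.toNat []).set k.toNat true)

def atakowane_pola (t : List (List Bool)) : Bool :=
  let n : Int := (t.length : Int)
  let sz0 : List (List Bool) :=
    (PySem.List.pyRange 0 n 1).map (fun _ => (PySem.List.pyRange 0 n 1).map (fun _ => false))
  let sz : List (List Bool) :=
    (PySem.List.pyRange 0 n 1).foldl (fun sz i =>
      (PySem.List.pyRange 0 n 1).foldl (fun sz j =>
        if PySem.List.pyGetD (PySem.List.pyGetD t i []) j false then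
          (PySem.List.pyRange 0 n 1).foldl (fun sz k => pvSet (pvSet sz i k) k i) sz
        else sz) sz) sz0
  -- the second double loop returns False at the first unmarked square, else True
  (PySem.List.pyRange 0 n 1).all (fun i =>
    (PySem.List.pyRange 0 n 1).all (fun j =>
      PySem.List.pyGetD (PySem.List.pyGetD sz i []) j false))

-- ===== PORT B =====
def atakowane_pola_alt (t : List (List Bool)) : Bool :=
  let n : Int := (t.length : Int)
  let rowsAll : Bool := t.all (fun r => (PySem.List.slice r (some 0) (some n)).any id)
  let colsAll : Bool := (PySem.List.pyRange 0 n 1).all (fun j =>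
    t.any (fun r => PySem.List.pyGetD r j false))
  rowsAll || colsAll

-- ===== PRECONDITION & SPEC =====
-- Python A raises IndexError iff some row is shorter than len(t); Pre_ admits exactly the inputs A returns on.
def Pre_atakowane_pola (t : List (List Bool)) : Prop := ∀ r ∈ t, t.length ≤ r.length
instance (t : List (List Bool)) : Decidable (Pre_atakowane_pola t) := by unfold Pre_atakowane_pola; infer_instance
def pvWitness_atakowane_pola : List (List Bool) := [[true, false], [false, true]]

-- On boards where every column holds a rook but some row holds none, A returns False (its inner loop marks
-- column i instead of column j, so A effectively only tests that every row has a rook); B returns True,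
-- the intended coverage answer.
def D_atakowane_pola (t : List (List Bool)) : Prop :=
  (∃ r ∈ t, ∀ j < t.length, r.getD j false = false) ∧
  (∀ j < t.length, ∃ r ∈ t, r.getD j false = true)
instance (t : List (List Bool)) : Decidable (D_atakowane_pola t) := by unfold D_atakowane_pola; infer_instance

def Spec_atakowane_pola (t : List (List Bool)) (out : Bool) : Prop :=
  ¬ D_atakowane_pola t → out = atakowane_pola_alt t
instance (t : List (List Bool)) (out : Bool) : Decidable (Spec_atakowane_pola t out) := by
  unfold Spec_atakowane_pola; infer_instance

def pvDiffWitness_atakowane_pola : List (List Bool) := [[true, true], [false, false]]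
def pvDiffWitnessOut_atakowane_pola : Bool × Bool := (false, true)

-- ===== CLAIM (what is proved, stated in full; the proofs are below) =====
def Claim_unchanged_atakowane_pola : Prop := ∀ (t : List (List Bool)), Dom_atakowane_pola t → Pre_atakowane_pola t → Spec_atakowane_pola t (atakowane_pola t)
def Claim_changed_atakowane_pola : Prop := Dom_atakowane_pola (pvDiffWitness_atakowane_pola) ∧ Pre_atakowane_pola (pvDiffWitness_atakowane_pola) ∧ D_atakowane_pola (pvDiffWitness_atakowane_pola) ∧ atakowane_pola (pvDiffWitness_atakowane_pola) = pvDiffWitnessOut_atakowane_pola.1 ∧ atakowane_pola_alt (pvDiffWitness_atakowane_pola) = pvDiffWitnessOut_atakowane_pola.2 ∧ pvDiffWitnessOut_atakowane_pola.1 ≠ pvDiffWitnessOut_atakowane_pola.2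
def Claim_exact_atakowane_pola : Prop := ∀ (t : List (List Bool)), Dom_atakowane_pola t → Pre_atakowane_pola t → D_atakowane_pola t → atakowane_pola t ≠ atakowane_pola_alt t

-- ===== LEMMAS AND PROOFS =====

-- matrix entry read (both indices Nat, default False)
def pvG (m : List (List Bool)) (a b : Nat) : Bool := (m.getD a []).getD b false

-- pvSet at Nat indices
def pvSetN (m : List (List Bool)) (i k : Nat) : List (List Bool) :=
  m.set i ((m.getD i []).set k true)

def pvDims (n : Nat) (m : List (List Bool)) : Prop :=
  m.length = n ∧ ∀ r ∈ m, r.length = n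

theorem pvSet_natCast (m : List (List Bool)) (i k : Nat) :
    pvSet m (i : Int) (k : Int) = pvSetN m i k := by
  simp [pvSet, pvSetN]

theorem pvDims_setN {n : Nat} {m : List (List Bool)} {i : Nat} (h : pvDims n m) (hi : i < n) (k : Nat) :
    pvDims n (pvSetN m i k) := by
  obtain ⟨hlen, hrow⟩ := h
  refine ⟨by simp [pvSetN, hlen], ?_⟩
  intro r hr
  rcases List.mem_or_eq_of_mem_set hr with h1 | h2
  · exact hrow r h1
  · subst h2
    rw [List.getD_eq_getElem m [] (by omega)]
    simpa using hrow _ (List.getElem_mem (by omega))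

theorem pvG_setN {n : Nat} {m : List (List Bool)} (h : pvDims n m) {i k : Nat}
    (hi : i < n) (hk : k < n) (a b : Nat) :
    pvG (pvSetN m i k) a b = if a = i ∧ b = k then true else pvG m a b := by
  obtain ⟨hlen, hrow⟩ := h
  by_cases ha : a < n
  · have ham : a < m.length := by omega
    have him : i < m.length := by omega
    by_cases hai : a = i
    · subst hai
      have hrowi : (m[a]).length = n := hrow _ (List.getElem_mem ham)
      simp only [pvG]
      have hrowset : (pvSetN m a k).getD a [] = (m[a]).set k true := by
        rw [List.getD_eq_getElem _ [] (by simp [pvSetN]; omega)]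
        simp [pvSetN, List.getElem?_eq_getElem ham]
      rw [hrowset, List.getD_eq_getElem m [] ham]
      simp only [true_and]
      by_cases hbk : b = k
      · subst hbk
        rw [List.getD_eq_getElem _ false (by simp; omega)]
        simp
      · simp only [hbk, if_false]
        by_cases hbm : b < (m[a]).length
        · rw [List.getD_eq_getElem _ false (by simp; omega), List.getD_eq_getElem _ false hbm]
          simp [Ne.symm hbk]
        · rw [List.getD_eq_default _ false (by simp; omega), List.getD_eq_default _ false (by omega)]
    · simp only [pvG]
      have hrowset : (pvSetN m i k).getD a [] = m.getD a [] := by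
        rw [List.getD_eq_getElem _ [] (by simp [pvSetN]; omega), List.getD_eq_getElem m [] ham]
        simp [pvSetN, Ne.symm hai]
      rw [hrowset]
      simp [hai]
  · have h1 : (pvSetN m i k)[a]? = none := List.getElem?_eq_none (by simp [pvSetN]; omega)
    have h2 : m[a]? = none := List.getElem?_eq_none (by omega)
    simp [pvG, List.getD_eq_getElem?_getD, h1, h2, show a ≠ i from by omega]

theorem pvKfold {n : Nat} {i : Nat} (hi : i < n) :
    ∀ (L : List Nat), (∀ k ∈ L, k < n) → ∀ (sz : List (List Bool)), pvDims n sz →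
      pvDims n (L.foldl (fun sz k => pvSetN (pvSetN sz i k) k i) sz) ∧
      ∀ a b : Nat, a < n → b < n →
        (pvG (L.foldl (fun sz k => pvSetN (pvSetN sz i k) k i) sz) a b = true ↔
          ((a = i ∧ b ∈ L) ∨ (b = i ∧ a ∈ L)) ∨ pvG sz a b = true) := by
  intro L
  induction L with
  | nil => intro _ sz h; exact ⟨h, by simp⟩
  | cons k L ih =>
    intro hL sz h
    have hk : k < n := hL k (List.mem_cons_self ..)
    have h1 : pvDims n (pvSetN sz i k) := pvDims_setN h hi k
    have h2 : pvDims n (pvSetN (pvSetN sz i k) k i) := pvDims_setN h1 hk i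
    obtain ⟨hd, hg⟩ := ih (fun x hx => hL x (List.mem_cons_of_mem _ hx)) _ h2
    refine ⟨by simpa using hd, ?_⟩
    intro a b ha hb
    simp only [List.foldl_cons]
    rw [hg a b ha hb, pvG_setN h1 hk hi, pvG_setN h hi hk]
    simp only [List.mem_cons]
    split_ifs <;> tauto

theorem pvJfold {n : Nat} (t : List (List Bool)) {i : Nat} (hi : i < n) :
    ∀ (L : List Nat), ∀ (sz : List (List Bool)), pvDims n sz →
      pvDims n (L.foldl (fun sz j => if pvG t i j then
          (List.range n).foldl (fun sz k => pvSetN (pvSetN sz i k) k i) sz else sz) sz) ∧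
      ∀ a b : Nat, a < n → b < n →
        (pvG (L.foldl (fun sz j => if pvG t i j then
            (List.range n).foldl (fun sz k => pvSetN (pvSetN sz i k) k i) sz else sz) sz) a b = true ↔
          ((∃ j ∈ L, pvG t i j = true) ∧ (a = i ∨ b = i)) ∨ pvG sz a b = true) := by
  intro L
  induction L with
  | nil => intro sz h; exact ⟨h, by simp⟩
  | cons j L ih =>
    intro sz h
    by_cases hc : pvG t i j = true
    · have hK := pvKfold hi (List.range n) (by simp) sz h
      obtain ⟨hd, hg⟩ := ih _ hK.1
      refine ⟨by simpa [hc] using hd, ?_⟩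
      intro a b ha hb
      simp only [List.foldl_cons, hc, if_true]
      rw [hg a b ha hb, hK.2 a b ha hb]
      simp only [List.mem_cons, List.mem_range]
      constructor
      · rintro (⟨⟨j', hj', hgj⟩, hab⟩ | ((⟨h1, h2⟩ | ⟨h1, h2⟩) | h3))
        · exact Or.inl ⟨⟨j', Or.inr hj', hgj⟩, hab⟩
        · exact Or.inl ⟨⟨j, Or.inl rfl, hc⟩, Or.inl h1⟩
        · exact Or.inl ⟨⟨j, Or.inl rfl, hc⟩, Or.inr h1⟩
        · exact Or.inr h3
      · rintro (⟨⟨j', hj', hgj⟩, hab⟩ | h3)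
        · rcases hj' with rfl | hj'
          · rcases hab with h1 | h1
            · exact Or.inr (Or.inl (Or.inl ⟨h1, hb⟩))
            · exact Or.inr (Or.inl (Or.inr ⟨h1, ha⟩))
          · exact Or.inl ⟨⟨j', hj', hgj⟩, hab⟩
        · exact Or.inr (Or.inr h3)
    · rw [Bool.not_eq_true] at hc
      obtain ⟨hd, hg⟩ := ih sz h
      refine ⟨by simpa [hc] using hd, ?_⟩
      intro a b ha hb
      simp only [List.foldl_cons, hc, Bool.false_eq_true, if_false]
      rw [hg a b ha hb]
      simp only [List.mem_cons]
      constructor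
      · rintro (⟨⟨j', hj', hgj⟩, hab⟩ | h3)
        · exact Or.inl ⟨⟨j', Or.inr hj', hgj⟩, hab⟩
        · exact Or.inr h3
      · rintro (⟨⟨j', hj', hgj⟩, hab⟩ | h3)
        · rcases hj' with rfl | hj'
          · exact absurd hgj (by simp [hc])
          · exact Or.inl ⟨⟨j', hj', hgj⟩, hab⟩
        · exact Or.inr h3

theorem pvIfold {n : Nat} (t : List (List Bool)) :
    ∀ (L : List Nat), (∀ i ∈ L, i < n) → ∀ (sz : List (List Bool)), pvDims n sz →
      pvDims n (L.foldl (fun sz i => (List.range n).foldl (fun sz j => if pvG t i j then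
          (List.range n).foldl (fun sz k => pvSetN (pvSetN sz i k) k i) sz else sz) sz) sz) ∧
      ∀ a b : Nat, a < n → b < n →
        (pvG (L.foldl (fun sz i => (List.range n).foldl (fun sz j => if pvG t i j then
            (List.range n).foldl (fun sz k => pvSetN (pvSetN sz i k) k i) sz else sz) sz) sz) a b = true ↔
          (∃ i ∈ L, (∃ j, j < n ∧ pvG t i j = true) ∧ (a = i ∨ b = i)) ∨ pvG sz a b = true) := by
  intro L
  induction L with
  | nil => intro _ sz h; exact ⟨h, by simp⟩
  | cons i L ih =>
    intro hL sz h
    have hi : i < n := hL i (List.mem_cons_self ..)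
    have hJ := pvJfold t hi (List.range n) sz h
    obtain ⟨hd, hg⟩ := ih (fun x hx => hL x (List.mem_cons_of_mem _ hx)) _ hJ.1
    refine ⟨by simpa using hd, ?_⟩
    intro a b ha hb
    simp only [List.foldl_cons]
    rw [hg a b ha hb, hJ.2 a b ha hb]
    simp only [List.mem_cons, List.mem_range]
    constructor
    · rintro (⟨i', hi', hrest⟩ | (⟨hex, hab⟩ | h3))
      · exact Or.inl ⟨i', Or.inr hi', hrest⟩
      · exact Or.inl ⟨i, Or.inl rfl, hex, hab⟩
      · exact Or.inr h3
    · rintro (⟨i', hi', hrest⟩ | h3)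
      · rcases hi' with rfl | hi'
        · exact Or.inr (Or.inl ⟨hrest.1, hrest.2⟩)
        · exact Or.inl ⟨i', hi', hrest⟩
      · exact Or.inr (Or.inr h3)

theorem pvG_fold (m : List (List Bool)) (a b : Nat) :
    (m.getD a []).getD b false = pvG m a b := rfl

theorem pvDims_replicate (n : Nat) :
    pvDims n (List.replicate n (List.replicate n false)) := by
  constructor
  · simp
  · intro r hr
    simp_all [List.eq_of_mem_replicate hr]

theorem pvG_replicate (n : Nat) (a b : Nat) :
    pvG (List.replicate n (List.replicate n false)) a b = false := by
  simp only [pvG, List.getD_eq_getElem?_getD, List.getElem?_replicate]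
  split_ifs <;> simp

theorem pvA_iff (t : List (List Bool)) :
    atakowane_pola t = true ↔
      ∀ i, i < t.length → ∃ j, j < t.length ∧ pvG t i j = true := by
  unfold atakowane_pola
  simp only [PySem.List.pyRange_zero_natCast, List.foldl_map, List.all_map,
    Function.comp_def, PySem.List.pyGetD_natCast, pvSet_natCast, pvG_fold,
    List.map_const', List.length_map, List.length_range]
  obtain ⟨hd, hg⟩ := pvIfold t (List.range t.length) (by simp) _ (pvDims_replicate t.length)
  rw [List.all_eq_true]
  constructor
  · intro H i hi
    have h1 := H i (by simpa using hi)
    rw [List.all_eq_true] at h1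
    have h2 := (hg i i hi hi).mp (h1 i (by simpa using hi))
    rcases h2 with ⟨i', hi', hex, hab⟩ | hfalse
    · rcases hab with rfl | rfl <;> exact hex
    · rw [pvG_replicate] at hfalse; exact absurd hfalse (by simp)
  · intro H i hi
    rw [List.all_eq_true]
    intro j hj
    rw [List.mem_range] at hi hj
    exact (hg i j hi hj).mpr (Or.inl ⟨i, by simpa using hi, H i hi, Or.inl rfl⟩)

theorem pvTakeAny (r : List Bool) (n : Nat) :
    (∃ x ∈ r.take n, x = true) ↔ ∃ j, j < n ∧ r.getD j false = true := by
  constructor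
  · rintro ⟨x, hx, rfl⟩
    obtain ⟨j, hj, hjx⟩ := List.getElem_of_mem hx
    rw [List.length_take] at hj
    refine ⟨j, by omega, ?_⟩
    rw [List.getD_eq_getElem r false (by omega), ← hjx, List.getElem_take]
  · rintro ⟨j, hjn, hg⟩
    have hjr : j < r.length := by
      by_contra h
      rw [List.getD_eq_default _ _ (by omega)] at hg
      exact absurd hg (by simp)
    rw [List.getD_eq_getElem r false hjr] at hg
    refine ⟨r[j], ?_, hg⟩
    have hmem : (r.take n)[j]'(by rw [List.length_take]; omega) ∈ r.take n :=
      List.getElem_mem _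
    rwa [List.getElem_take] at hmem

theorem pvRows_iff (t : List (List Bool)) :
    (∀ i, i < t.length → ∃ j, j < t.length ∧ pvG t i j = true) ↔
      (∀ r ∈ t, ∃ j, j < t.length ∧ r.getD j false = true) := by
  constructor
  · intro H r hr
    obtain ⟨i, hi, rfl⟩ := List.getElem_of_mem hr
    simpa [pvG, List.getD_eq_getElem?_getD, List.getElem?_eq_getElem hi] using H i hi
  · intro H i hi
    simpa [pvG, List.getD_eq_getElem?_getD, List.getElem?_eq_getElem hi] using H t[i] (List.getElem_mem hi)

theorem pvB_iff (t : List (List Bool)) :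
    atakowane_pola_alt t = true ↔
      (∀ r ∈ t, ∃ j, j < t.length ∧ r.getD j false = true) ∨
      (∀ j, j < t.length → ∃ r ∈ t, r.getD j false = true) := by
  unfold atakowane_pola_alt
  simp only [PySem.List.slice_zero_start, PySem.List.slice_to_natCast,
    PySem.List.pyRange_zero_natCast, List.all_map, Function.comp_def,
    PySem.List.pyGetD_natCast, Bool.or_eq_true, List.all_eq_true, List.any_eq_true,
    List.mem_range, id]
  constructor
  · rintro (h | h)
    · exact Or.inl (fun r hr => (pvTakeAny r t.length).mp (by simpa using h r hr))
    · exact Or.inr (fun j hj => h j hj)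
  · rintro (h | h)
    · exact Or.inl (fun r hr => by simpa using (pvTakeAny r t.length).mpr (h r hr))
    · exact Or.inr (fun j hj => h j hj)

theorem atakowane_pola_spec : Claim_unchanged_atakowane_pola := by
  intro t _ _
  unfold Spec_atakowane_pola
  intro hnd
  by_cases hR : ∀ r ∈ t, ∃ j, j < t.length ∧ r.getD j false = true
  · rw [(pvA_iff t).mpr ((pvRows_iff t).mpr hR), (pvB_iff t).mpr (Or.inl hR)]
  · have hA : atakowane_pola t = false := by
      rw [Bool.eq_false_iff]
      intro hA
      exact hR ((pvRows_iff t).mp ((pvA_iff t).mp hA))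
    have hC : ¬ ∀ j, j < t.length → ∃ r ∈ t, r.getD j false = true := by
      intro hc
      apply hnd
      unfold D_atakowane_pola
      push Not at hR
      obtain ⟨r, hr, hre⟩ := hR
      refine ⟨⟨r, hr, fun j hj => ?_⟩, hc⟩
      simpa [List.getD_eq_getElem?_getD] using hre j hj
    have hB : atakowane_pola_alt t = false := by
      rw [Bool.eq_false_iff]
      intro hB
      rcases (pvB_iff t).mp hB with h | h
      · exact hR h
      · exact hC h
    rw [hA, hB]

theorem atakowane_pola_changed : Claim_changed_atakowane_pola := by
  unfold Claim_changed_atakowane_pola; decide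

theorem atakowane_pola_tight : Claim_exact_atakowane_pola := by
  intro t _ _ hd
  obtain ⟨⟨r, hr, hempty⟩, hcols⟩ := hd
  have hA : atakowane_pola t = false := by
    rw [Bool.eq_false_iff]
    intro hA
    obtain ⟨j, hj, hgj⟩ := ((pvRows_iff t).mp ((pvA_iff t).mp hA)) r hr
    rw [hempty j hj] at hgj
    exact absurd hgj (by simp)
  have hB : atakowane_pola_alt t = true := (pvB_iff t).mpr (Or.inr hcols)
  rw [hA, hB]
  simp
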